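-- pv_equiv track=rewrite | github.com/Dennis1989/CAD-Collection-and-Ranking | blueprints/ranking_task/ranking_utils.py | get_ordering_agreement_inversion_count
-- ===== SOURCE A (Python) =====
-- def get_ordering_agreement_inversion_count(reference, ordering):
--     """
--     Compute the number of inversion between reference and ordering.
--     An inversion is a pair a,b such that a<b (or a>b) according to reference and a>b (resp. a<b) according to ordering.
--     Notice that this definition is symmetric and that for every inversion a,b are not ties according to any ranking.
--     """
--     inversions = 0
--     for (score_a_ordering, a) in enumerate(ordering):
--         for (score_b_ordering, b) in enumerate(ordering):
--             if (a != b):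
--                 # determine scores according to reference
--                 score_a_reference = -1
--                 score_b_reference = -1
--                 for (idx, s) in enumerate(reference):
--                     if a in s:
--                         score_a_reference = idx
--                 for (idx, s) in enumerate(reference):
--                     if b in s:
--                         score_b_reference = idx
--
--                 # comp score deltas
--                 delta_ordering = score_a_ordering - score_b_ordering
--                 delta_reference = score_a_reference - score_b_reference
--
--                 # determine if it is an inversion
--                 if delta_reference == 0:
--                     pass
--                 elif delta_ordering * delta_reference > 0: # delta_ordering != 0 because a!=b
--                     # same sign => no inversion
--                     pass
--                 else:
--                     # otherwise => inversion
--                     inversions += 1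
--
--     return -inversions
-- ===== SOURCE B (Python) =====
-- def get_ordering_agreement_inversion_count(reference, ordering):
--     # bucket of each element = index of the LAST reference bucket containing it (-1 if none)
--     bucket = {}
--     for idx, s in enumerate(reference):
--         for x in s:
--             bucket[x] = idx
--     scores = [bucket.get(x, -1) for x in ordering]
--     # A counts each unordered inverted pair twice (once in each direction),
--     # so count pairs (earlier, later) with earlier score > later score and double.
--     inv = 0
--     seen = []
--     for s in scores:
--         for t in seen:
--             if t > s:
--                 inv += 1
--         seen.append(s)
--     return -2 * inv
-- ===== Notes on version B (the rewrite author's own statement) =====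
-- stated objective: faster
-- what changed: B precomputes an element->last-bucket dict once (replacing the per-pair rescans of reference) and counts each unordered pair once over a triangular earlier-seen pass, doubling the count, instead of A's full n*n directed-pair loop that rescans all of reference twice per pair.
import Mathlib
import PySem

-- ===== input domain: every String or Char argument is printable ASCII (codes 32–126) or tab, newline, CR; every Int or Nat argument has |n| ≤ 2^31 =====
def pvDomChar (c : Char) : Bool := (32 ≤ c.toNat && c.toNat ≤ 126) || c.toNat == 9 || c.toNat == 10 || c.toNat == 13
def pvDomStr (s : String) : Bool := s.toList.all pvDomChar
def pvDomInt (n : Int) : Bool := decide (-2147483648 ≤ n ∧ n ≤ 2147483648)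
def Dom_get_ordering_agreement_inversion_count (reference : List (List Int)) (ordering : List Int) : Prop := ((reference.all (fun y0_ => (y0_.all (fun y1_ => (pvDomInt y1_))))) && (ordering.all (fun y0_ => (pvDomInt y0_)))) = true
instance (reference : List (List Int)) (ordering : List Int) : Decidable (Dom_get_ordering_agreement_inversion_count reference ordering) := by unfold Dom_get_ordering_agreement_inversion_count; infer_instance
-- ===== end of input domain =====

-- B replaces A's per-pair rescans of `reference` by one precomputed element→bucket dict and
-- counts each unordered pair once (earlier-seen triangular pass), doubling the count: faster.

-- ===== PORT A =====
-- the two inner 'for (idx, s) in enumerate(reference)' score scans of A (last bucket containing v wins)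
def pvScoreRef (reference : List (List Int)) (v : Int) : Int :=
  (PySem.List.enumerate reference).foldl
    (fun acc p => if v ∈ p.2 then p.1 else acc) (-1)

def get_ordering_agreement_inversion_count (reference : List (List Int)) (ordering : List Int) : Int :=
  let inversions :=
    (PySem.List.enumerate ordering).foldl (fun inv pa =>
      (PySem.List.enumerate ordering).foldl (fun inv pb =>
        if pa.2 ≠ pb.2 then
          let sa := pvScoreRef reference pa.2
          let sb := pvScoreRef reference pb.2
          let dO := pa.1 - pb.1
          let dR := sa - sb
          if dR = 0 then inv
          else if dO * dR > 0 then inv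
          else inv + 1
        else inv) inv) 0
  ;
  -inversions

-- ===== PORT B =====
-- B: bucket[x] = idx for every x in every reference bucket (later buckets overwrite)
def pvBucket (reference : List (List Int)) : PySem.Dict Int Int :=
  (PySem.List.enumerate reference).foldl
    (fun d p => p.2.foldl (fun d x => d.insert x p.1) d) PySem.Dict.empty

def get_ordering_agreement_inversion_count_alt (reference : List (List Int)) (ordering : List Int) : Int :=
  let bucket := pvBucket reference
  let scores := ordering.map (fun x => bucket.getD x (-1))
  let r := scores.foldl
    (fun (st : Int × List Int) s =>
      (st.2.foldl (fun acc t => if t > s then acc + 1 else acc) st.1, st.2 ++ [s]))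
    ((0 : Int), ([] : List Int))
  ;
  -2 * r.1

-- ===== PRECONDITION & SPEC =====
def Spec_get_ordering_agreement_inversion_count (reference : List (List Int)) (ordering : List Int) (out : Int) : Prop := out = get_ordering_agreement_inversion_count_alt reference ordering
instance (reference : List (List Int)) (ordering : List Int) (out : Int) : Decidable (Spec_get_ordering_agreement_inversion_count reference ordering out) := by unfold Spec_get_ordering_agreement_inversion_count; infer_instance

-- ===== CLAIM (what is proved, stated in full; the proofs are below) =====
def Claim_equal_get_ordering_agreement_inversion_count : Prop := ∀ (reference : List (List Int)) (ordering : List Int), Dom_get_ordering_agreement_inversion_count reference ordering → Spec_get_ordering_agreement_inversion_count reference ordering (get_ordering_agreement_inversion_count reference ordering)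

-- ===== LEMMAS AND PROOFS =====

-- 0/1 weight of a directed pair (index, score), (index, score): A's inversion test
def cpair (p q : Int × Int) : Int :=
  if p.2 - q.2 = 0 then 0 else if (p.1 - q.1) * (p.2 - q.2) > 0 then 0 else 1

-- number of y in l with y < x
def cntlt (x : Int) (l : List Int) : Int := (l.map (fun y => if y < x then 1 else 0)).sum

-- triangular inversion count of a score list
def tri : List Int → Int
  | [] => 0
  | x :: xs => cntlt x xs + tri xs

-- ---- step 1: pvScoreRef = dict lookup ----

lemma getD_foldl_insert (s : List Int) (d : PySem.Dict Int Int) (i v : Int) :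
    (s.foldl (fun d x => d.insert x i) d).getD v (-1)
      = if v ∈ s then i else d.getD v (-1) := by
  induction s generalizing d with
  | nil => simp
  | cons x xs ih =>
      simp only [List.foldl_cons, ih, PySem.Dict.getD_insert, List.mem_cons]
      by_cases hm : v ∈ xs <;> by_cases hx : v = x <;> simp [hm, hx]

lemma getD_bucket_gen (ps : List (Int × List Int)) (d : PySem.Dict Int Int) (v : Int) :
    (ps.foldl (fun d p => p.2.foldl (fun d x => d.insert x p.1) d) d).getD v (-1)
      = ps.foldl (fun acc p => if v ∈ p.2 then p.1 else acc) (d.getD v (-1)) := by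
  induction ps generalizing d with
  | nil => simp
  | cons p ps ih =>
      simp only [List.foldl_cons, ih, getD_foldl_insert]

lemma scoreRef_eq_bucket (reference : List (List Int)) (v : Int) :
    pvScoreRef reference v = (pvBucket reference).getD v (-1) := by
  unfold pvScoreRef pvBucket
  rw [getD_bucket_gen]
  simp

-- ---- step 2: A's double loop is the double sum of cpair over enumerated scores ----

lemma enumerate_map {α β : Type} (f : α → β) (l : List α) (s : Int) :
    PySem.List.enumerate (l.map f) s
      = (PySem.List.enumerate l s).map (fun p => (p.1, f p.2)) := by
  induction l generalizing s with
  | nil => simp [PySem.List.enumerate_nil]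
  | cons x xs ih => simp [PySem.List.enumerate_cons, ih]

lemma A_eq_sum (reference : List (List Int)) (ordering : List Int) :
    get_ordering_agreement_inversion_count reference ordering
      = -(((PySem.List.enumerate (ordering.map (pvScoreRef reference))).map (fun p =>
          ((PySem.List.enumerate (ordering.map (pvScoreRef reference))).map (fun q =>
            cpair p q)).sum)).sum) := by
  have hbody : ∀ (pa pb : Int × Int) (inv : Int),
      (if pa.2 ≠ pb.2 then
        (if pvScoreRef reference pa.2 - pvScoreRef reference pb.2 = 0 then inv
         else if (pa.1 - pb.1) * (pvScoreRef reference pa.2 - pvScoreRef reference pb.2) > 0 then inv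
         else inv + 1)
       else inv)
      = inv + cpair (pa.1, pvScoreRef reference pa.2) (pb.1, pvScoreRef reference pb.2) := by
    intro pa pb inv
    by_cases h : pa.2 = pb.2
    · simp [h, cpair]
    · simp only [cpair]
      split_ifs <;> simp_all
  unfold get_ordering_agreement_inversion_count
  simp only [hbody, PySem.List.foldl_add, enumerate_map, List.map_map]
  simp [Function.comp_def]

-- ---- step 3: the double sum is twice the triangular count ----

lemma sum_cpair_left (x : Int) (xs : List Int) (s : Int) :
    ((PySem.List.enumerate xs (s + 1)).map (fun q => cpair (s, x) q)).sum = cntlt x xs := by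
  have h : ∀ q ∈ PySem.List.enumerate xs (s + 1),
      cpair (s, x) q = (fun y => if y < x then (1:Int) else 0) q.2 := by
    intro q hq
    rw [PySem.List.mem_enumerate_iff] at hq
    obtain ⟨k, hk, rfl⟩ := hq
    have hj : s < s + 1 + (k : Int) := by omega
    simp only [cpair]
    split_ifs with h1 h2 h3 <;> try rfl
    · exfalso; omega
    · exfalso; nlinarith
    · exfalso
      have : x < xs[k] := by omega
      nlinarith
  rw [List.map_congr_left h]
  unfold cntlt
  rw [← PySem.List.map_snd_enumerate xs (s + 1), List.map_map]
  simp [Function.comp_def]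

lemma sum_cpair_right (x : Int) (xs : List Int) (s : Int) :
    ((PySem.List.enumerate xs (s + 1)).map (fun p => cpair p (s, x))).sum = cntlt x xs := by
  have h : ∀ p ∈ PySem.List.enumerate xs (s + 1),
      cpair p (s, x) = (fun y => if y < x then (1:Int) else 0) p.2 := by
    intro p hp
    rw [PySem.List.mem_enumerate_iff] at hp
    obtain ⟨k, hk, rfl⟩ := hp
    have hj : s < s + 1 + (k : Int) := by omega
    simp only [cpair]
    split_ifs with h1 h2 h3 <;> try rfl
    · exfalso; omega
    · exfalso; nlinarith
    · exfalso
      have : x < xs[k] := by omega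
      nlinarith
  rw [List.map_congr_left h]
  unfold cntlt
  rw [← PySem.List.map_snd_enumerate xs (s + 1), List.map_map]
  simp [Function.comp_def]

lemma double_sum_eq_two_tri (l : List Int) (s : Int) :
    ((PySem.List.enumerate l s).map (fun p =>
      ((PySem.List.enumerate l s).map (fun q => cpair p q)).sum)).sum = 2 * tri l := by
  induction l generalizing s with
  | nil => simp [PySem.List.enumerate_nil, tri]
  | cons x xs ih =>
      rw [PySem.List.enumerate_cons]
      simp only [List.map_cons, List.sum_cons]
      have hsplit : ((PySem.List.enumerate xs (s + 1)).map (fun p =>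
          cpair p (s, x) + ((PySem.List.enumerate xs (s + 1)).map (fun q => cpair p q)).sum)).sum
          = ((PySem.List.enumerate xs (s + 1)).map (fun p => cpair p (s, x))).sum
            + ((PySem.List.enumerate xs (s + 1)).map (fun p =>
                ((PySem.List.enumerate xs (s + 1)).map (fun q => cpair p q)).sum)).sum :=
        PySem.List.sum_map_add_int _ _ _
      rw [hsplit, ih (s + 1), sum_cpair_left, sum_cpair_right]
      have h0 : cpair (s, x) (s, x) = 0 := by simp [cpair]
      rw [h0]
      simp [tri]
      ring

-- ---- step 4: B's triangular pass ----

-- number of t in seen with x < t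
def cntgt (seen : List Int) (x : Int) : Int := (seen.map (fun t => if x < t then 1 else 0)).sum

def bcount : List Int → List Int → Int
  | [], _ => 0
  | x :: xs, seen => cntgt seen x + bcount xs (seen ++ [x])

lemma bfold_eq_bcount (l seen : List Int) (acc : Int) :
    (l.foldl (fun (st : Int × List Int) s =>
        (st.2.foldl (fun acc t => if t > s then acc + 1 else acc) st.1, st.2 ++ [s]))
      (acc, seen)).1 = acc + bcount l seen := by
  induction l generalizing seen acc with
  | nil => simp [bcount]
  | cons x xs ih =>
      simp only [List.foldl_cons]
      rw [ih, PySem.List.foldl_ite_add_one (p := fun t => t > x)]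
      have hc : ((seen.countP fun t => decide (t > x)) : Int) = cntgt seen x := by
        rw [← PySem.List.sum_map_ite_one_zero]
        simp [cntgt]
      simp only [bcount, hc]
      ring

lemma bcount_split (l : List Int) : ∀ seen, bcount l seen = (l.map (cntgt seen)).sum + bcount l [] := by
  induction l with
  | nil => simp [bcount]
  | cons x xs ih =>
      intro seen
      have h1 : ∀ y, cntgt (seen ++ [x]) y = cntgt seen y + cntgt [x] y := by
        intro y; simp [cntgt]
      simp only [bcount, ih (seen ++ [x]), List.nil_append]
      rw [List.map_congr_left (fun a _ => h1 a), PySem.List.sum_map_add_int, ih [x]]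
      simp [cntgt]
      ring

lemma bcount_nil_eq_tri (l : List Int) : bcount l [] = tri l := by
  induction l with
  | nil => rfl
  | cons x xs ih =>
      simp only [bcount, List.nil_append, tri]
      rw [bcount_split xs [x], ih]
      have h : xs.map (cntgt [x]) = xs.map (fun y => if y < x then (1:Int) else 0) := by
        apply List.map_congr_left; intro a _; simp [cntgt]
      rw [h]
      simp [cntgt, cntlt]

-- ---- assembly ----

lemma B_eq (reference : List (List Int)) (ordering : List Int) :
    get_ordering_agreement_inversion_count_alt reference ordering
      = -2 * tri (ordering.map (pvScoreRef reference)) := by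
  unfold get_ordering_agreement_inversion_count_alt
  have hs : ordering.map (fun x => (pvBucket reference).getD x (-1))
      = ordering.map (pvScoreRef reference) := by
    apply List.map_congr_left; intro a _; exact (scoreRef_eq_bucket reference a).symm
  simp only [hs, bfold_eq_bcount, bcount_nil_eq_tri, zero_add]

-- ===== VERDICT (by name: the statement is the Claim_ definition above) =====
theorem get_ordering_agreement_inversion_count_spec : Claim_equal_get_ordering_agreement_inversion_count := by
  intro reference ordering _
  unfold Spec_get_ordering_agreement_inversion_count
  rw [A_eq_sum, B_eq, double_sum_eq_two_tri]
  ring
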